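-- pv_equiv track=rewrite | github.com/CaptrainWalrus/CaptrainWalrus.github.io | src/processing/structured_generate.py | organize_by_priority
-- ===== SOURCE A (Python) =====
-- def organize_by_priority(changes):
--     """Organize changes by priority: plans -> features -> changes -> fixes"""
--     organized = {
--         'plans': [],
--         'features': [],
--         'changes': [],
--         'fixes': []
--     }
--
--     for date, entries in changes.items():
--         for entry in entries:
--             entry_type = entry.get('type', 'change')
--             priority = entry.get('priority', 'medium')
--
--             # Add date and priority to entry
--             entry['date'] = date
--             entry['priority'] = priority
--
--             # Categorize by type
--             if entry_type == 'plan':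
--                 organized['plans'].append(entry)
--             elif entry_type == 'feature':
--                 organized['features'].append(entry)
--             elif entry_type == 'fix':
--                 organized['fixes'].append(entry)
--             else:
--                 organized['changes'].append(entry)
--
--     # Sort each category by priority (high -> medium -> low) then by date (recent first)
--     for category in organized:
--         organized[category].sort(key=lambda x: (
--             {'high': 0, 'medium': 1, 'low': 2}.get(x.get('priority', 'medium'), 1),
--             x.get('date', ''),
--         ), reverse=True)
--
--     return organized
-- ===== SOURCE B (Python) =====
-- def organize_by_priority(changes):
--     """Organize changes by priority: plans -> features -> changes -> fixes"""
--     # One pass to tag entries into a single flat list, ONE global stable sort,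
--     # then partition the sorted list into the four categories.
--     flat = []
--     for date, entries in changes.items():
--         for entry in entries:
--             entry['date'] = date
--             entry['priority'] = entry.get('priority', 'medium')
--             flat.append(entry)
--     rank = {'high': 0, 'medium': 1, 'low': 2}
--     flat.sort(key=lambda x: (rank.get(x.get('priority', 'medium'), 1),
--                              x.get('date', '')), reverse=True)
--     plans, features, chs, fixes = [], [], [], []
--     for entry in flat:
--         t = entry.get('type', 'change')
--         if t == 'plan':
--             plans.append(entry)
--         elif t == 'feature':
--             features.append(entry)
--         elif t == 'fix':
--             fixes.append(entry)
--         else: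
--             chs.append(entry)
--     return {'plans': plans, 'features': features, 'changes': chs, 'fixes': fixes}
-- ===== Notes on version B (the rewrite author's own statement) =====
-- stated objective: alternative
-- what changed: A partitions entries into four per-category buckets first and stable-sorts each bucket separately; B tags all entries into one flat list, stable-sorts it once globally with the same (priority_rank, date) key, and then partitions the sorted list into the four categories, relying on stability to give identical per-bucket order.
import Mathlib
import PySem

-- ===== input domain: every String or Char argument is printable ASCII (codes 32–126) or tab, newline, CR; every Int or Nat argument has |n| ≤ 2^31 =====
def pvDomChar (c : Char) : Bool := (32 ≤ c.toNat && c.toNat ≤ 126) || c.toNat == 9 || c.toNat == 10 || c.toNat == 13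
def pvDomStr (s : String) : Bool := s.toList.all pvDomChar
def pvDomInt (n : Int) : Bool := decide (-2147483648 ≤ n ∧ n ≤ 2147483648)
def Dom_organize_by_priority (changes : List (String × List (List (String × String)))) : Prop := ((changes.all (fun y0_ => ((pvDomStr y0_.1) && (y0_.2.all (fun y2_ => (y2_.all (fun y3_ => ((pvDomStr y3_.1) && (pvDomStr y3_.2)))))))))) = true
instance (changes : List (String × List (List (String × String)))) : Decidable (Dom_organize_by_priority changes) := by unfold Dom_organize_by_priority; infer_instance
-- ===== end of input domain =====

-- B replaces A's four per-category stable sorts by one global stable sort of a flat tagged list followed by a partition (same return value; both A and B mutate the entry dicts in place identically).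
-- ===== PORT A =====
def pvRankMap : PySem.Dict String Int := PySem.Dict.mk [("high", 0), ("medium", 1), ("low", 2)]

def pvRank (x : List (String × String)) : Int :=
  pvRankMap.getD ((PySem.Dict.mk x).getD "priority" "medium") 1

def pvDate (x : List (String × String)) : String :=
  (PySem.Dict.mk x).getD "date" ""

-- entry['date'] = date; entry['priority'] = entry.get('priority', 'medium')
def pvTag (date : String) (entry : List (String × String)) : List (String × String) :=
  let d := PySem.Dict.mk entry
  ((d.insert "date" date).insert "priority" (d.getD "priority" "medium")).items

def organize_by_priority (changes : List (String × List (List (String × String)))) : List (String × List (List (String × String))) :=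
  let org0 : PySem.Dict String (List (List (String × String))) :=
    PySem.Dict.mk [("plans", []), ("features", []), ("changes", []), ("fixes", [])]
  let org1 := changes.foldl (fun org de =>
    de.2.foldl (fun org entry =>
      let t := (PySem.Dict.mk entry).getD "type" "change"
      let e := pvTag de.1 entry
      if t = "plan" then org.modify "plans" [] (· ++ [e])
      else if t = "feature" then org.modify "features" [] (· ++ [e])
      else if t = "fix" then org.modify "fixes" [] (· ++ [e])
      else org.modify "changes" [] (· ++ [e])) org) org0
  let org2 := org1.keys.foldl
    (fun org c => org.modify c [] (fun l => PySem.List.sorted2 l pvRank pvDate true)) org1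
  org2.items

-- ===== PORT B =====
def organize_by_priority_alt (changes : List (String × List (List (String × String)))) : List (String × List (List (String × String))) :=
  let flat := changes.foldl (fun acc de =>
    de.2.foldl (fun acc entry => acc ++ [pvTag de.1 entry]) acc) []
  let flat := PySem.List.sorted2 flat pvRank pvDate true
  let buckets := flat.foldl (fun (acc : List (List (String × String)) × List (List (String × String)) × List (List (String × String)) × List (List (String × String))) e =>
      let t := (PySem.Dict.mk e).getD "type" "change"
      if t = "plan" then (acc.1 ++ [e], acc.2.1, acc.2.2.1, acc.2.2.2)
      else if t = "feature" then (acc.1, acc.2.1 ++ [e], acc.2.2.1, acc.2.2.2)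
      else if t = "fix" then (acc.1, acc.2.1, acc.2.2.1, acc.2.2.2 ++ [e])
      else (acc.1, acc.2.1, acc.2.2.1 ++ [e], acc.2.2.2)) ([], [], [], [])
  [("plans", buckets.1), ("features", buckets.2.1), ("changes", buckets.2.2.1), ("fixes", buckets.2.2.2)]

-- ===== PRECONDITION & SPEC =====
def Spec_organize_by_priority (changes : List (String × List (List (String × String)))) (out : List (String × List (List (String × String)))) : Prop := out = organize_by_priority_alt changes
instance (changes : List (String × List (List (String × String)))) (out : List (String × List (List (String × String)))) : Decidable (Spec_organize_by_priority changes out) := by unfold Spec_organize_by_priority; infer_instance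

-- ===== CLAIM (what is proved, stated in full; the proofs are below) =====
def Claim_equal_organize_by_priority : Prop := ∀ (changes : List (String × List (List (String × String)))), Dom_organize_by_priority changes → Spec_organize_by_priority changes (organize_by_priority changes)

-- ===== LEMMAS AND PROOFS =====

-- ---- proof-side abbreviations ----
def typeOf (e : List (String × String)) : String := (PySem.Dict.mk e).getD "type" "change"

def catName (t : String) : String :=
  if t = "plan" then "plans" else if t = "feature" then "features"
  else if t = "fix" then "fixes" else "changes"

def pairsOf (changes : List (String × List (List (String × String)))) : List (String × List (String × String)) :=
  changes.flatMap (fun de => de.2.map (fun e => (de.1, e)))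

def tagOf (p : String × List (String × String)) : String × List (String × String) :=
  (catName (typeOf p.2), pvTag p.1 p.2)

def sortS (l : List (List (String × String))) : List (List (String × String)) :=
  PySem.List.sorted2 l pvRank pvDate true

def bucketP (c : String) (changes : List (String × List (List (String × String)))) : List (List (String × String)) :=
  (((pairsOf changes).map tagOf).filter (fun q => q.1 == c)).map (fun q => q.2)

theorem typeOf_pvTag (date : String) (e : List (String × String)) :
    typeOf (pvTag date e) = typeOf e := by
  have h : PySem.Dict.mk (pvTag date e)
      = ((PySem.Dict.mk e).insert "date" date).insert "priority"
          ((PySem.Dict.mk e).getD "priority" "medium") := rfl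
  rw [typeOf, h, PySem.Dict.getD_insert, PySem.Dict.getD_insert,
    if_neg (by decide), if_neg (by decide)]
  rfl

-- ---- generic list lemmas ----
theorem foldl_append_map {α β : Type} (l : List α) (f : α → β) (acc : List β) :
    l.foldl (fun acc x => acc ++ [f x]) acc = acc ++ l.map f := by
  induction l generalizing acc with
  | nil => simp
  | cons x rest ih => simp [ih]

-- ---- stable insertion sort vs filter ----
theorem ins_head {α : Type} (before : α → α → Bool) (x : α) (l : List α)
    (h : ∀ z ∈ l, before x z = true) : PySem.List.insertBy before x l = x :: l := by
  cases l with
  | nil => rfl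
  | cons y ys => simp [PySem.List.insertBy, h y (by simp)]

theorem pairwise_ins {α : Type} (before : α → α → Bool)
    (hA : ∀ a b, before a b = true → before b a = false)
    (hT : ∀ x y z, before x y = true → before z y = false → before x z = true)
    (x : α) (l : List α) (hp : l.Pairwise (fun a b => before b a = false)) :
    (PySem.List.insertBy before x l).Pairwise (fun a b => before b a = false) := by
  induction l with
  | nil => simp [PySem.List.insertBy]
  | cons y ys ih =>
      rcases List.pairwise_cons.mp hp with ⟨hy, hys⟩
      by_cases hxy : before x y = true
      · rw [show PySem.List.insertBy before x (y :: ys) = x :: y :: ys by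
          simp [PySem.List.insertBy, hxy]]
        refine List.pairwise_cons.mpr ⟨?_, hp⟩
        intro z hz
        rcases List.mem_cons.mp hz with rfl | hz
        · exact hA x z hxy
        · exact hA x z (hT x y z hxy (hy z hz))
      · rw [show PySem.List.insertBy before x (y :: ys) = y :: PySem.List.insertBy before x ys by
          simp [PySem.List.insertBy, hxy]]
        refine List.pairwise_cons.mpr ⟨?_, ih hys⟩
        intro z hz
        rcases (PySem.List.mem_insertBy before x z ys).mp hz with rfl | hz
        · exact Bool.eq_false_iff.mpr hxy
        · exact hy z hz

theorem filter_ins {α : Type} (before : α → α → Bool) (p : α → Bool)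
    (hT : ∀ x y z, before x y = true → before z y = false → before x z = true)
    (x : α) (l : List α) (hp : l.Pairwise (fun a b => before b a = false)) :
    (PySem.List.insertBy before x l).filter p
      = if p x then PySem.List.insertBy before x (l.filter p) else l.filter p := by
  induction l with
  | nil => by_cases hpx : p x = true <;> simp [PySem.List.insertBy, hpx]
  | cons y ys ih =>
      rcases List.pairwise_cons.mp hp with ⟨hy, hys⟩
      by_cases hxy : before x y = true
      · have hall : ∀ z ∈ (y :: ys).filter p, before x z = true := by
          intro z hz
          have hz' : z ∈ y :: ys := List.mem_of_mem_filter hz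
          rcases List.mem_cons.mp hz' with rfl | hz'
          · exact hxy
          · exact hT x y z hxy (hy z hz')
        rw [show PySem.List.insertBy before x (y :: ys) = x :: y :: ys by
          simp [PySem.List.insertBy, hxy]]
        rw [ins_head before x _ hall]
        by_cases hpx : p x = true <;> simp [hpx]
      · rw [show PySem.List.insertBy before x (y :: ys) = y :: PySem.List.insertBy before x ys by
          simp [PySem.List.insertBy, hxy]]
        by_cases hpy : p y = true
        · by_cases hpx : p x = true
          · rw [show PySem.List.insertBy before x ((y :: ys).filter p)
                  = y :: PySem.List.insertBy before x (ys.filter p) by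
              simp [hpy, PySem.List.insertBy, hxy]]
            simp [hpy, hpx, ih hys]
          · simp [hpy, hpx, ih hys]
        · by_cases hpx : p x = true <;> simp [hpy, hpx, ih hys]

theorem filter_foldl_ins {α : Type} (before : α → α → Bool) (p : α → Bool)
    (hA : ∀ a b, before a b = true → before b a = false)
    (hT : ∀ x y z, before x y = true → before z y = false → before x z = true)
    (xs : List α) (acc : List α) (hp : acc.Pairwise (fun a b => before b a = false)) :
    (xs.foldl (fun a x => PySem.List.insertBy before x a) acc).filter p
      = (xs.filter p).foldl (fun a x => PySem.List.insertBy before x a) (acc.filter p) := by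
  induction xs generalizing acc with
  | nil => rfl
  | cons x rest ih =>
      simp only [List.foldl_cons, List.filter_cons]
      rw [ih _ (pairwise_ins before hA hT x acc hp)]
      rw [filter_ins before p hT x acc hp]
      by_cases hpx : p x = true <;> simp [hpx]

theorem lt2_asymm {α : Type} (k1 : α → Int) (k2 : α → String) (a b : α)
    (h : (decide (k1 a < k1 b) || (!decide (k1 b < k1 a) && decide (k2 a < k2 b))) = true) :
    (decide (k1 b < k1 a) || (!decide (k1 a < k1 b) && decide (k2 b < k2 a))) = false := by
  simp only [Bool.or_eq_true, Bool.and_eq_true, Bool.not_eq_true', decide_eq_true_iff,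
    decide_eq_false_iff_not] at h
  simp only [Bool.or_eq_false_iff, Bool.and_eq_false_iff, Bool.not_eq_false',
    decide_eq_true_iff, decide_eq_false_iff_not]
  rcases h with h1 | ⟨h1, h2⟩
  · exact ⟨by omega, Or.inl (by omega)⟩
  · exact ⟨h1, Or.inr (not_lt.mpr (le_of_lt h2))⟩

theorem lt2_trans_neg {α : Type} (k1 : α → Int) (k2 : α → String) (x y z : α)
    (h1 : (decide (k1 y < k1 x) || (!decide (k1 x < k1 y) && decide (k2 y < k2 x))) = true)
    (h2 : (decide (k1 y < k1 z) || (!decide (k1 z < k1 y) && decide (k2 y < k2 z))) = false) :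
    (decide (k1 z < k1 x) || (!decide (k1 x < k1 z) && decide (k2 z < k2 x))) = true := by
  simp only [Bool.or_eq_true, Bool.and_eq_true, Bool.not_eq_true', decide_eq_true_iff,
    decide_eq_false_iff_not] at h1
  simp only [Bool.or_eq_false_iff, Bool.and_eq_false_iff, Bool.not_eq_false',
    decide_eq_true_iff, decide_eq_false_iff_not] at h2
  simp only [Bool.or_eq_true, Bool.and_eq_true, Bool.not_eq_true', decide_eq_true_iff,
    decide_eq_false_iff_not]
  obtain ⟨h2a, h2b⟩ := h2
  rcases h1 with h1 | ⟨h1a, h1b⟩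
  · exact Or.inl (by omega)
  · rcases h2b with h2b | h2b
    · exact Or.inl (by omega)
    · exact Or.inr ⟨by omega, lt_of_le_of_lt (not_lt.mp h2b) h1b⟩

theorem filter_sorted2_rev {α : Type} (k1 : α → Int) (k2 : α → String) (p : α → Bool) (xs : List α) :
    (PySem.List.sorted2 xs k1 k2 true).filter p = PySem.List.sorted2 (xs.filter p) k1 k2 true := by
  simp only [PySem.List.sorted2]
  have := filter_foldl_ins
    (fun a b => (decide (k1 b < k1 a) || (!decide (k1 a < k1 b) && decide (k2 b < k2 a))))
    p (fun a b h => lt2_asymm k1 k2 b a h)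
    (fun a b c h1 h2 => lt2_trans_neg k1 k2 a b c h1 h2)
    xs [] List.Pairwise.nil
  simpa using this

-- ---- characterisation of port A ----
theorem A1 (l : List (String × List (List (String × String))))
    (init : PySem.Dict String (List (List (String × String)))) :
    (l.foldl (fun org de =>
      de.2.foldl (fun org entry =>
        let t := (PySem.Dict.mk entry).getD "type" "change"
        let e := pvTag de.1 entry
        if t = "plan" then org.modify "plans" [] (· ++ [e])
        else if t = "feature" then org.modify "features" [] (· ++ [e])
        else if t = "fix" then org.modify "fixes" [] (· ++ [e])
        else org.modify "changes" [] (· ++ [e])) org) init)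
    = ((pairsOf l).map tagOf).foldl (fun d q => d.modify q.1 [] (· ++ [q.2])) init := by
  rw [List.foldl_map]
  induction l generalizing init with
  | nil => rfl
  | cons de rest ih =>
      simp only [List.foldl_cons, pairsOf, List.flatMap_cons, List.foldl_append, List.foldl_map]
      have hfun : (fun (org : PySem.Dict String (List (List (String × String))))
          (entry : List (String × String)) =>
        let t := (PySem.Dict.mk entry).getD "type" "change"
        let e := pvTag de.1 entry
        if t = "plan" then org.modify "plans" [] (· ++ [e])
        else if t = "feature" then org.modify "features" [] (· ++ [e])
        else if t = "fix" then org.modify "fixes" [] (· ++ [e])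
        else org.modify "changes" [] (· ++ [e]))
          = (fun org entry => org.modify (tagOf (de.1, entry)).1 [] (· ++ [(tagOf (de.1, entry)).2])) := by
        funext org entry
        simp only [tagOf, catName, typeOf]
        split_ifs <;> rfl
      rw [hfun]
      exact ih _

set_option maxHeartbeats 1600000 in
theorem A_eq (changes : List (String × List (List (String × String)))) :
    organize_by_priority changes
      = [("plans", sortS (bucketP "plans" changes)), ("features", sortS (bucketP "features" changes)),
         ("changes", sortS (bucketP "changes" changes)), ("fixes", sortS (bucketP "fixes" changes))] := by
  simp only [organize_by_priority]
  rw [A1]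
  set org0 : PySem.Dict String (List (List (String × String))) :=
    PySem.Dict.mk [("plans", []), ("features", []), ("changes", []), ("fixes", [])] with horg0
  set L := (pairsOf changes).map tagOf with hL
  set org1 := L.foldl (fun d q => d.modify q.1 [] (· ++ [q.2])) org0 with horg1
  have hk : org1.keys = ["plans", "features", "changes", "fixes"] := by
    have h : org1.keys = PySem.Set.update org0.keys (L.map Prod.fst) :=
      PySem.Dict.keys_foldl_modify_key L Prod.fst [] (fun d q v => v ++ [q.2]) org0
    rw [h, PySem.Set.update_eq_append_filter]
    have hnil : (PySem.Set.ofList (L.map Prod.fst)).filter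
        (fun y => !PySem.Set.contains org0.keys y) = [] := by
      apply List.filter_eq_nil_iff.mpr
      intro y hy
      obtain ⟨q, hq, rfl⟩ := List.mem_map.mp ((PySem.Set.mem_ofList _ _).mp hy)
      obtain ⟨p, hp, rfl⟩ := List.mem_map.mp hq
      show ¬ ((!PySem.Set.contains org0.keys (tagOf p).1) = true)
      rw [horg0]
      simp only [tagOf, catName]
      split_ifs <;> decide
    rw [hnil, horg0]
    decide
  have hg : ∀ c, org1.getD c [] = org0.getD c [] ++ bucketP c changes := fun c =>
    PySem.Dict.getD_foldl_modify_append L org0 c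
  rw [hk]
  simp only [List.foldl_cons, List.foldl_nil]
  set f : List (List (String × String)) → List (List (String × String)) :=
    fun l => PySem.List.sorted2 l pvRank pvDate true with hf
  set m1 := org1.modify "plans" [] f with hm1
  set m2 := m1.modify "features" [] f with hm2
  set m3 := m2.modify "changes" [] f with hm3
  set m4 := m3.modify "fixes" [] f with hm4
  have k1 : m1.keys = org1.keys := by
    rw [hm1, PySem.Dict.keys_modify]
    exact PySem.Dict.keys_insert_of_contains _ _
      ((PySem.Dict.contains_iff_mem_keys _ _).mpr (by rw [hk]; simp))
  have k2 : m2.keys = org1.keys := by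
    rw [hm2, PySem.Dict.keys_modify, PySem.Dict.keys_insert_of_contains _ _
      ((PySem.Dict.contains_iff_mem_keys _ _).mpr (by rw [k1, hk]; simp))]
    exact k1
  have k3 : m3.keys = org1.keys := by
    rw [hm3, PySem.Dict.keys_modify, PySem.Dict.keys_insert_of_contains _ _
      ((PySem.Dict.contains_iff_mem_keys _ _).mpr (by rw [k2, hk]; simp))]
    exact k2
  have k4 : m4.keys = org1.keys := by
    rw [hm4, PySem.Dict.keys_modify, PySem.Dict.keys_insert_of_contains _ _
      ((PySem.Dict.contains_iff_mem_keys _ _).mpr (by rw [k3, hk]; simp))]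
    exact k3
  have hnodup : m4.keys.Nodup := by rw [k4, hk]; decide
  rw [PySem.Dict.items_eq_map_keys m4 hnodup [], k4, hk]
  simp only [List.map_cons, List.map_nil]
  have v1 : m4.getD "plans" [] = f (org1.getD "plans" []) := by
    rw [hm4, PySem.Dict.getD_modify, if_neg (by decide), hm3, PySem.Dict.getD_modify,
      if_neg (by decide), hm2, PySem.Dict.getD_modify, if_neg (by decide), hm1,
      PySem.Dict.getD_modify, if_pos rfl]
  have v2 : m4.getD "features" [] = f (org1.getD "features" []) := by
    rw [hm4, PySem.Dict.getD_modify, if_neg (by decide), hm3, PySem.Dict.getD_modify,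
      if_neg (by decide), hm2, PySem.Dict.getD_modify, if_pos rfl, hm1,
      PySem.Dict.getD_modify, if_neg (by decide)]
  have v3 : m4.getD "changes" [] = f (org1.getD "changes" []) := by
    rw [hm4, PySem.Dict.getD_modify, if_neg (by decide), hm3, PySem.Dict.getD_modify,
      if_pos rfl, hm2, PySem.Dict.getD_modify, if_neg (by decide), hm1,
      PySem.Dict.getD_modify, if_neg (by decide)]
  have v4 : m4.getD "fixes" [] = f (org1.getD "fixes" []) := by
    rw [hm4, PySem.Dict.getD_modify, if_pos rfl, hm3, PySem.Dict.getD_modify,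
      if_neg (by decide), hm2, PySem.Dict.getD_modify, if_neg (by decide), hm1,
      PySem.Dict.getD_modify, if_neg (by decide)]
  have hb : ∀ c, c = "plans" ∨ c = "features" ∨ c = "changes" ∨ c = "fixes" →
      org1.getD c [] = bucketP c changes := by
    intro c hcases
    rw [hg c, horg0]
    have e1 : (PySem.Dict.mk [("plans", ([] : List (List (String × String)))), ("features", []),
        ("changes", []), ("fixes", [])]).getD "plans" [] = [] := by decide
    have e2 : (PySem.Dict.mk [("plans", ([] : List (List (String × String)))), ("features", []),
        ("changes", []), ("fixes", [])]).getD "features" [] = [] := by decide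
    have e3 : (PySem.Dict.mk [("plans", ([] : List (List (String × String)))), ("features", []),
        ("changes", []), ("fixes", [])]).getD "changes" [] = [] := by decide
    have e4 : (PySem.Dict.mk [("plans", ([] : List (List (String × String)))), ("features", []),
        ("changes", []), ("fixes", [])]).getD "fixes" [] = [] := by decide
    rcases hcases with rfl | rfl | rfl | rfl
    · rw [e1, List.nil_append]
    · rw [e2, List.nil_append]
    · rw [e3, List.nil_append]
    · rw [e4, List.nil_append]
  rw [v1, v2, v3, v4, hb "plans" (by tauto), hb "features" (by tauto),
    hb "changes" (by tauto), hb "fixes" (by tauto)]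
  rfl

-- ---- characterisation of port B ----
theorem B1 (l : List (String × List (List (String × String))))
    (acc : List (List (String × String))) :
    (l.foldl (fun acc de => de.2.foldl (fun acc entry => acc ++ [pvTag de.1 entry]) acc) acc)
      = acc ++ (pairsOf l).map (fun p => pvTag p.1 p.2) := by
  induction l generalizing acc with
  | nil => simp [pairsOf]
  | cons de rest ih =>
      simp only [List.foldl_cons, pairsOf, List.flatMap_cons, List.map_append, List.map_map]
      rw [foldl_append_map, ih]
      simp [pairsOf, List.append_assoc]

theorem fold4 (l : List (List (String × String)))
    (a b c d : List (List (String × String))) :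
    (l.foldl (fun (acc : List (List (String × String)) × List (List (String × String)) ×
        List (List (String × String)) × List (List (String × String))) e =>
      let t := (PySem.Dict.mk e).getD "type" "change"
      if t = "plan" then (acc.1 ++ [e], acc.2.1, acc.2.2.1, acc.2.2.2)
      else if t = "feature" then (acc.1, acc.2.1 ++ [e], acc.2.2.1, acc.2.2.2)
      else if t = "fix" then (acc.1, acc.2.1, acc.2.2.1, acc.2.2.2 ++ [e])
      else (acc.1, acc.2.1, acc.2.2.1 ++ [e], acc.2.2.2)) (a, b, c, d))
    = (a ++ l.filter (fun e => catName (typeOf e) == "plans"),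
       b ++ l.filter (fun e => catName (typeOf e) == "features"),
       c ++ l.filter (fun e => catName (typeOf e) == "changes"),
       d ++ l.filter (fun e => catName (typeOf e) == "fixes")) := by
  induction l generalizing a b c d with
  | nil => simp
  | cons e rest ih =>
      simp only [List.foldl_cons, List.filter_cons]
      by_cases h1 : (PySem.Dict.mk e).getD "type" "change" = "plan"
      · simp [h1, typeOf, catName, ih]
      · by_cases h2 : (PySem.Dict.mk e).getD "type" "change" = "feature"
        · simp [h2, typeOf, catName, ih]
        · by_cases h3 : (PySem.Dict.mk e).getD "type" "change" = "fix"
          · simp [h3, typeOf, catName, ih]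
          · simp [h1, h2, h3, typeOf, catName, ih]

theorem Bbucket (c : String) (changes : List (String × List (List (String × String)))) :
    (PySem.List.sorted2 (((pairsOf changes).map tagOf).map (fun q => q.2)) pvRank pvDate true).filter
        (fun e => catName (typeOf e) == c)
      = sortS (bucketP c changes) := by
  rw [filter_sorted2_rev pvRank pvDate, List.filter_map]
  unfold sortS bucketP
  have hfc : ∀ q ∈ (pairsOf changes).map tagOf,
      ((fun e => catName (typeOf e) == c) ∘ (fun q : String × List (String × String) => q.2)) q
        = (fun q : String × List (String × String) => q.1 == c) q := by
    intro q hq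
    obtain ⟨p, hp, rfl⟩ := List.mem_map.mp hq
    simp [Function.comp, tagOf, typeOf_pvTag]
  rw [List.filter_congr hfc]

theorem B_eq (changes : List (String × List (List (String × String)))) :
    organize_by_priority_alt changes
      = [("plans", sortS (bucketP "plans" changes)), ("features", sortS (bucketP "features" changes)),
         ("changes", sortS (bucketP "changes" changes)), ("fixes", sortS (bucketP "fixes" changes))] := by
  simp only [organize_by_priority_alt]
  rw [B1 changes []]
  simp only [List.nil_append]
  rw [show (pairsOf changes).map (fun p => pvTag p.1 p.2)
      = ((pairsOf changes).map tagOf).map (fun q => q.2) from by rw [List.map_map]; rfl]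
  rw [fold4 (PySem.List.sorted2 (((pairsOf changes).map tagOf).map (fun q => q.2))
    pvRank pvDate true) [] [] [] []]
  simp only [List.nil_append]
  rw [Bbucket "plans" changes, Bbucket "features" changes, Bbucket "changes" changes,
    Bbucket "fixes" changes]

theorem organize_agree (changes : List (String × List (List (String × String)))) :
    organize_by_priority changes = organize_by_priority_alt changes := by
  rw [A_eq, B_eq]

-- ===== VERDICT (by name: the statement is the Claim_ definition above) =====
theorem organize_by_priority_spec : Claim_equal_organize_by_priority := by
  intro changes _
  unfold Spec_organize_by_priority
  exact organize_agree changes
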